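-- pv_equiv track=rewrite | github.com/weakunix/python_git | live_events/CompetitveProgrammingPractice/project_euler/Ruoyu/euler66.py | GetMinM
-- ===== SOURCE A (Python) =====
-- def GetMinM(trip, D) -> int:
--     m = 0
--     x = trip[0]
--     y = trip[1]
--     k = trip[2]
--     #k | x + ym
--     while True:
--         m += 1
--         if (x + y * m) % k == 0 and m ** 2 > D:
--             return m
-- ===== SOURCE B (Python) =====
-- def _gcd(a, b):
--     while b:
--         a, b = b, a % b
--     return a
--
--
-- def GetMinM(trip, D) -> int:
--     x = trip[0]
--     y = trip[1]
--     k = trip[2]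
--     # true period of the solution set of k | x + y*m
--     step = abs(k) // _gcd(abs(y), abs(k))
--     # smallest positive m solving the congruence (lies in [1, step])
--     m = 0
--     while True:
--         m += 1
--         if (x + y * m) % k == 0:
--             break
--     # jump along the arithmetic progression of solutions until m*m > D
--     while m * m <= D:
--         m += step
--     return m
-- ===== Notes on version B (the rewrite author's own statement) =====
-- stated objective: alternative
-- what changed: Instead of testing every m=1,2,... against both conditions, B finds the smallest positive solution of the congruence k | x+y*m and then jumps along the arithmetic progression of solutions with stride |k|/gcd(y,k) until m*m > D.
import Mathlib
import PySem

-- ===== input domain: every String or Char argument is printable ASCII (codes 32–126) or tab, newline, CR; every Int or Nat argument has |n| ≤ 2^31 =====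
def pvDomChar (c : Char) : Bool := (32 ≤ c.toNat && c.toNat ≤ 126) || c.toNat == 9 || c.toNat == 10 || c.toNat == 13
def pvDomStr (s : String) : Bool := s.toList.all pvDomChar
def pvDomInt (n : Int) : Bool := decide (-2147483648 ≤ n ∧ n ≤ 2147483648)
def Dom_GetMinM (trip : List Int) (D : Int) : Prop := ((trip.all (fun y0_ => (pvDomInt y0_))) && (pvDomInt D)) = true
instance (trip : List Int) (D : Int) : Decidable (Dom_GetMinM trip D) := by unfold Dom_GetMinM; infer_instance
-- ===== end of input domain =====

-- B replaces A's linear scan by: find the smallest positive solution of the congruence,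
-- then jump along the arithmetic progression of solutions (stride |k|/gcd(y,k)) until m*m > D.


-- ===== PORT A =====
-- A's 'while True' loop; the fuel only makes the recursion total: under Pre_ the answer is
-- found strictly before the fuel runs out (proved below), so the 0-fuel branch is never taken.
def GetMinM.loop (x y k D : Int) : Nat → Int → Int
  | 0, m => m
  | fuel + 1, m =>
      if PySem.Int.mod (x + y * (m + 1)) k = 0 ∧ (m + 1) ^ 2 > D then m + 1
      else GetMinM.loop x y k D fuel (m + 1)

def GetMinM (trip : List Int) (D : Int) : Int :=
  let x := PySem.List.pyGetD trip 0 0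
  let y := PySem.List.pyGetD trip 1 0
  let k := PySem.List.pyGetD trip 2 0
  GetMinM.loop x y k D (D.toNat + k.natAbs + 2) 0

-- ===== PORT B =====
-- Source B's _gcd; it is only called on the nonnegative values abs(y), abs(k), where Python's
-- '%' coincides with Nat.mod, so the port works on Nat.
def bgcd : Nat → Nat → Nat
  | a, 0 => a
  | a, b + 1 => bgcd (b + 1) (a % (b + 1))
termination_by _ b => b
decreasing_by exact Nat.mod_lt _ (Nat.succ_pos b)

-- Source B's first loop ('while True: m += 1; if (x+y*m)%k==0: break'), fuel as in GetMinM.loop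
def GetMinM_alt.find (x y k : Int) : Nat → Int → Int
  | 0, m => m
  | fuel + 1, m =>
      if PySem.Int.mod (x + y * (m + 1)) k = 0 then m + 1
      else GetMinM_alt.find x y k fuel (m + 1)

-- Source B's second loop ('while m*m <= D: m += step')
def GetMinM_alt.jump (D step : Int) : Nat → Int → Int
  | 0, m => m
  | fuel + 1, m =>
      if m * m ≤ D then GetMinM_alt.jump D step fuel (m + step)
      else m

def GetMinM_alt (trip : List Int) (D : Int) : Int :=
  let x := PySem.List.pyGetD trip 0 0
  let y := PySem.List.pyGetD trip 1 0
  let k := PySem.List.pyGetD trip 2 0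
  let step := PySem.Int.floordiv |k| (bgcd y.natAbs k.natAbs : Int)
  GetMinM_alt.jump D step (D.toNat + 1) (GetMinM_alt.find x y k (k.natAbs + 1) 0)

-- ===== PRECONDITION & SPEC =====
-- Pre_ is exactly where Python A returns: trip has the three entries it reads, k ≠ 0
-- (else '%' raises ZeroDivisionError), and gcd(y,k) | x (else no m ever satisfies the
-- congruence and A loops forever).
def Pre_GetMinM (trip : List Int) (D : Int) : Prop :=
  3 ≤ trip.length ∧ trip.getD 2 0 ≠ 0 ∧ (Int.gcd (trip.getD 1 0) (trip.getD 2 0) : Int) ∣ trip.getD 0 0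
instance (trip : List Int) (D : Int) : Decidable (Pre_GetMinM trip D) := by unfold Pre_GetMinM; infer_instance

def pvWitness_GetMinM : List Int × Int := ([1, 1, 2], 3)

def Spec_GetMinM (trip : List Int) (D : Int) (out : Int) : Prop := out = GetMinM_alt trip D
instance (trip : List Int) (D : Int) (out : Int) : Decidable (Spec_GetMinM trip D out) := by unfold Spec_GetMinM; infer_instance

-- ===== CLAIM (what is proved, stated in full; the proofs are below) =====
def Claim_equal_GetMinM : Prop := ∀ (trip : List Int) (D : Int), Dom_GetMinM trip D → Pre_GetMinM trip D → Spec_GetMinM trip D (GetMinM trip D)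

-- ===== LEMMAS AND PROOFS =====

theorem bgcd_eq (a b : Nat) : bgcd a b = Nat.gcd b a := by
  induction b using Nat.strong_induction_on generalizing a with
  | _ b ih =>
    cases b with
    | zero => rw [bgcd.eq_def, Nat.gcd_zero_left]
    | succ b =>
      rw [bgcd.eq_def]
      simp only []
      rw [ih _ (Nat.mod_lt _ (Nat.succ_pos b)), Nat.gcd_succ]

-- A's loop returns the first m past the start satisfying its test, given enough fuel
theorem loopA_eq (x y k D : Int) (n : Int) : ∀ (fuel : Nat) (m : Int), m < n → n ≤ m + fuel →
    (PySem.Int.mod (x + y * n) k = 0 ∧ n ^ 2 > D) →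
    (∀ j, m < j → j < n → ¬(PySem.Int.mod (x + y * j) k = 0 ∧ j ^ 2 > D)) →
    GetMinM.loop x y k D fuel m = n := by
  intro fuel
  induction fuel with
  | zero => intro m h1 h2 _ _; omega
  | succ fuel ih =>
    intro m h1 h2 hn hmin
    rw [GetMinM.loop]
    by_cases h : PySem.Int.mod (x + y * (m + 1)) k = 0 ∧ (m + 1) ^ 2 > D
    · rw [if_pos h]
      by_contra hne
      exact hmin (m + 1) (by omega) (by omega) h
    · rw [if_neg h]
      have hlt : m + 1 < n := by
        rcases eq_or_lt_of_le (show m + 1 ≤ n by omega) with he | hl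
        · exact absurd (he ▸ hn) h
        · exact hl
      exact ih (m + 1) hlt (by omega) hn (fun j hj1 hj2 => hmin j (by omega) hj2)

theorem find_eq (x y k : Int) (n : Int) : ∀ (fuel : Nat) (m : Int), m < n → n ≤ m + fuel →
    PySem.Int.mod (x + y * n) k = 0 →
    (∀ j, m < j → j < n → ¬ PySem.Int.mod (x + y * j) k = 0) →
    GetMinM_alt.find x y k fuel m = n := by
  intro fuel
  induction fuel with
  | zero => intro m h1 h2 _ _; omega
  | succ fuel ih =>
    intro m h1 h2 hn hmin
    rw [GetMinM_alt.find]
    by_cases h : PySem.Int.mod (x + y * (m + 1)) k = 0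
    · rw [if_pos h]
      by_contra hne
      exact hmin (m + 1) (by omega) (by omega) h
    · rw [if_neg h]
      have hlt : m + 1 < n := by
        rcases eq_or_lt_of_le (show m + 1 ≤ n by omega) with he | hl
        · exact absurd (he ▸ hn) h
        · exact hl
      exact ih (m + 1) hlt (by omega) hn (fun j hj1 hj2 => hmin j (by omega) hj2)

theorem jump_eq (D step : Int) : ∀ (fuel i : Nat) (m : Int), i ≤ fuel →
    (m + i * step) * (m + i * step) > D →
    (∀ j : Nat, j < i → (m + j * step) * (m + j * step) ≤ D) →
    GetMinM_alt.jump D step fuel m = m + i * step := by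
  intro fuel
  induction fuel with
  | zero =>
    intro i m hi hgt _
    interval_cases i
    simp [GetMinM_alt.jump]
  | succ fuel ih =>
    intro i m hi hgt hle
    rw [GetMinM_alt.jump]
    cases i with
    | zero =>
      simp only [Nat.cast_zero, zero_mul, add_zero] at hgt ⊢
      rw [if_neg (by omega)]
    | succ i =>
      have h0 : m * m ≤ D := by
        have := hle 0 (Nat.succ_pos i)
        simpa using this
      rw [if_pos h0]
      have := ih i (m + step) (by omega)
        (by push_cast at hgt ⊢; ring_nf at hgt ⊢; linarith)
        (by
          intro j hj
          have := hle (j + 1) (by omega)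
          push_cast at this ⊢; ring_nf at this ⊢; linarith)
      rw [this]
      push_cast; ring


theorem kk_facts (y k : Int) (hk : k ≠ 0) :
    1 ≤ |k| / (Int.gcd y k : Int) ∧ (Int.gcd y k : Int) * (|k| / (Int.gcd y k : Int)) = |k| := by
  have hg : 0 < (Int.gcd y k : Int) := by positivity
  have hdvd : (Int.gcd y k : Int) ∣ |k| := (dvd_abs _ _).mpr (Int.gcd_dvd_right y k)
  have hmul := Int.mul_ediv_cancel' hdvd
  refine ⟨?_, hmul⟩
  by_contra h
  have h0 : 0 ≤ |k| / (Int.gcd y k : Int) := Int.ediv_nonneg (abs_nonneg k) (le_of_lt hg)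
  have : |k| = 0 := by nlinarith
  simp only [abs_eq_zero] at this; exact hk this

theorem step_dvd (y k : Int) (hk : k ≠ 0) : k ∣ y * (|k| / (Int.gcd y k : Int)) := by
  obtain ⟨yg, hyg⟩ : (Int.gcd y k : Int) ∣ y := Int.gcd_dvd_left y k
  have hmul := (kk_facts y k hk).2
  set g : Int := (Int.gcd y k : Int) with hgdef
  set kk : Int := |k| / g with hkkdef
  have he : y * kk = yg * |k| := by rw [hyg, ← hmul]; ring
  rw [he]
  exact Dvd.dvd.mul_left ((dvd_abs k k).mpr dvd_rfl) yg

theorem diff_dvd (x y k a b : Int) (hk : k ≠ 0) (h1 : k ∣ x + y * a) (h2 : k ∣ x + y * b) :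
    (|k| / (Int.gcd y k : Int)) ∣ (a - b) := by
  set g : Int := (Int.gcd y k : Int) with hgdef
  have hg : 0 < g := by rw [hgdef]; positivity
  obtain ⟨yg, hyg⟩ : g ∣ y := Int.gcd_dvd_left y k
  obtain ⟨kq, hkq⟩ : g ∣ k := Int.gcd_dvd_right y k
  have hyq : y / g = yg := by rw [hyg]; exact Int.mul_ediv_cancel_left _ (ne_of_gt hg)
  have hkqq : k / g = kq := by rw [hkq]; exact Int.mul_ediv_cancel_left _ (ne_of_gt hg)
  have hcop0 : Int.gcd yg kq = 1 := by
    have h1' := Int.gcd_div_gcd_div_gcd (i := y) (j := k) (by rw [hgdef] at hg; exact_mod_cast hg)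
    rwa [← hgdef, hyq, hkqq] at h1'
  have hky : k ∣ y * (a - b) := by
    have hd := dvd_sub h1 h2
    have he : x + y * a - (x + y * b) = y * (a - b) := by ring
    rwa [he] at hd
  obtain ⟨c, hcc⟩ := hky
  rw [hyg, hkq] at hcc
  have hq : kq ∣ (a - b) * yg :=
    ⟨c, mul_left_cancel₀ (ne_of_gt hg) (by linear_combination hcc)⟩
  have hmain : kq ∣ a - b :=
    Int.dvd_of_dvd_mul_left_of_gcd_one hq (by rw [Int.gcd_comm]; exact hcop0)
  rcases abs_choice k with hc | hc
  · have hkkdef : |k| / g = kq := by rw [hc, hkqq]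
    rw [hkkdef]; exact hmain
  · have hkkdef : |k| / g = -kq := by
      rw [hc, hkq, show -(g * kq) = g * (-kq) by ring]
      exact Int.mul_ediv_cancel_left _ (ne_of_gt hg)
    rw [hkkdef]; exact (neg_dvd).mpr hmain

theorem exists_pos_sol (x y k : Int) (hk : k ≠ 0) (hgx : (Int.gcd y k : Int) ∣ x) :
    ∃ m : Int, 1 ≤ m ∧ k ∣ x + y * m := by
  obtain ⟨q, hq⟩ := hgx
  have hbez : (Int.gcd y k : Int) = y * Int.gcdA y k + k * Int.gcdB y k := Int.gcd_eq_gcd_ab y k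
  set m0 : Int := -(q * Int.gcdA y k) with hm0
  have hsol0 : k ∣ x + y * m0 := by
    refine ⟨q * Int.gcdB y k, ?_⟩
    rw [hq, hm0]
    linear_combination q * hbez
  set kk : Int := |k| / (Int.gcd y k : Int) with hkk
  have hkk1 : 1 ≤ kk := (kk_facts y k hk).1
  have hstep : k ∣ y * kk := step_dvd y k hk
  refine ⟨m0 + (1 + |m0|) * kk, ?_, ?_⟩
  · have h1 : (1 + |m0|) * 1 ≤ (1 + |m0|) * kk :=
      mul_le_mul_of_nonneg_left hkk1 (by positivity)
    have h2 := neg_abs_le m0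
    nlinarith [abs_nonneg m0]
  · have he : x + y * (m0 + (1 + |m0|) * kk) = (x + y * m0) + (1 + |m0|) * (y * kk) := by ring
    rw [he]
    exact dvd_add hsol0 (Dvd.dvd.mul_left hstep _)

theorem core_eq (x y k D : Int) (hk : k ≠ 0) (hgx : (Int.gcd y k : Int) ∣ x) :
    GetMinM.loop x y k D (D.toNat + k.natAbs + 2) 0 =
    GetMinM_alt.jump D (PySem.Int.floordiv |k| ((bgcd y.natAbs k.natAbs : Nat) : Int)) (D.toNat + 1)
      (GetMinM_alt.find x y k (k.natAbs + 1) 0) := by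
  have hg : 0 < (Int.gcd y k : Int) := by positivity
  have hbg : ((bgcd y.natAbs k.natAbs : Nat) : Int) = (Int.gcd y k : Int) := by
    rw [bgcd_eq, Nat.gcd_comm]; rfl
  rw [hbg, PySem.Int.floordiv_eq_ediv_of_pos hg]
  set g : Int := (Int.gcd y k : Int) with hgdef
  set kk : Int := |k| / g with hkkdef
  have hkk1 : 1 ≤ kk := (kk_facts y k hk).1
  have hmul : g * kk = |k| := (kk_facts y k hk).2
  have hstep : k ∣ y * kk := step_dvd y k hk
  have hg1 : 1 ≤ g := hg
  have habs : (0:Int) < |k| := abs_pos.mpr hk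
  have hkkabs : kk ≤ |k| := by nlinarith
  have hknat : |k| = (k.natAbs : Int) := Int.abs_eq_natAbs k
  -- minimal positive solution r
  obtain ⟨msol, hm1, hmsol⟩ := exists_pos_sol x y k hk hgx
  have hexn : ∃ nn : Nat, k ∣ x + y * ((nn : Int) + 1) :=
    ⟨(msol - 1).toNat, by rw [Int.toNat_of_nonneg (by omega)]; simpa using hmsol⟩
  set r : Int := ((Nat.find hexn : Nat) : Int) + 1 with hrdef
  have hr : k ∣ x + y * r := Nat.find_spec hexn
  have hr1 : 1 ≤ r := by rw [hrdef]; omega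
  have hrmin : ∀ j : Int, 1 ≤ j → j < r → ¬ k ∣ x + y * j := by
    intro j hj1 hjr hdj
    have hidx : ((j - 1).toNat : Int) = j - 1 := Int.toNat_of_nonneg (by omega)
    have hlt : (j - 1).toNat < Nat.find hexn := by omega
    exact Nat.find_min hexn hlt (by rw [hidx, show j - 1 + 1 = j by ring]; exact hdj)
  have hrkk : r ≤ kk := by
    by_contra hcon
    have hsol' : k ∣ x + y * (r - kk) := by
      have he : x + y * (r - kk) = (x + y * r) - y * kk := by ring
      rw [he]; exact dvd_sub hr hstep
    exact hrmin (r - kk) (by omega) (by omega) hsol'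
  -- minimal jump count i
  have hexi : ∃ i : Nat, D < (r + (i : Int) * kk) * (r + (i : Int) * kk) := by
    refine ⟨D.toNat, ?_⟩
    have h1 : (D.toNat : Int) * 1 ≤ (D.toNat : Int) * kk :=
      mul_le_mul_of_nonneg_left hkk1 (by positivity)
    have h2 : D ≤ (D.toNat : Int) := Int.self_le_toNat D
    nlinarith
  set i : Nat := Nat.find hexi with hidef
  set n : Int := r + (i : Int) * kk with hndef
  have hn : D < n * n := Nat.find_spec hexi
  have himin : ∀ j : Nat, j < i → (r + (j : Int) * kk) * (r + (j : Int) * kk) ≤ D :=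
    fun j hj => not_lt.mp (Nat.find_min hexi hj)
  have hsoln : k ∣ x + y * n := by
    have he : x + y * n = (x + y * r) + (i : Int) * (y * kk) := by rw [hndef]; ring
    rw [he]; exact dvd_add hr (Dvd.dvd.mul_left hstep _)
  have hn1 : 1 ≤ n := by
    have : (0:Int) ≤ (i : Int) * kk := by positivity
    omega
  -- A-side minimality
  have hAmin : ∀ j : Int, 0 < j → j < n →
      ¬(PySem.Int.mod (x + y * j) k = 0 ∧ j ^ 2 > D) := by
    rintro j hj0 hjn ⟨hmod, hsq⟩
    have hdj : k ∣ x + y * j := (PySem.Int.mod_eq_zero_iff_dvd _ _).mp hmod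
    have hjr : r ≤ j := by
      by_contra hcon
      exact hrmin j (by omega) (by omega) hdj
    obtain ⟨t, ht⟩ := diff_dvd x y k j r hk hdj hr
    rw [← hkkdef] at ht
    have hcomm : kk * t = t * kk := mul_comm _ _
    have ht0 : 0 ≤ t := by nlinarith
    have htn : ((t.toNat : Nat) : Int) = t := Int.toNat_of_nonneg ht0
    have htlt : t.toNat < i := by
      by_contra hcon
      have hge : (i : Int) ≤ t := by omega
      have : (i : Int) * kk ≤ t * kk := mul_le_mul_of_nonneg_right hge (by omega)
      omega
    have hle := himin t.toNat htlt
    rw [htn] at hle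
    have hjeq : j = r + t * kk := by omega
    rw [pow_two] at hsq
    rw [← hjeq] at hle
    omega
  -- fuel bounds
  have hDbig : 1 ≤ i → (i : Int) ≤ D ∧ n ≤ D + kk := by
    intro hi1
    have hlast := himin (i - 1) (by omega)
    have hcast : (((i - 1 : Nat)) : Int) = (i : Int) - 1 := by omega
    rw [hcast] at hlast
    have hm1' : 1 ≤ r + ((i : Int) - 1) * kk := by nlinarith
    have hmD : r + ((i : Int) - 1) * kk ≤ D := by nlinarith
    constructor
    · nlinarith
    · have : n = (r + ((i : Int) - 1) * kk) + kk := by rw [hndef]; ring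
      omega
  -- LHS = n
  have hlhs : GetMinM.loop x y k D (D.toNat + k.natAbs + 2) 0 = n := by
    apply loopA_eq x y k D n _ 0 (by omega)
    · push_cast
      rcases Nat.eq_zero_or_pos i with hi0 | hi1
      · have : n = r := by rw [hndef, hi0]; push_cast; ring
        have h2 : D ≤ (D.toNat : Int) := Int.self_le_toNat D
        omega
      · have := hDbig hi1
        have h2 : D ≤ (D.toNat : Int) := Int.self_le_toNat D
        omega
    · exact ⟨(PySem.Int.mod_eq_zero_iff_dvd _ _).mpr hsoln, by rw [pow_two]; exact hn⟩
    · intro j hj1 hj2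
      exact hAmin j hj1 hj2
  -- RHS: find = r
  have hfind : GetMinM_alt.find x y k (k.natAbs + 1) 0 = r := by
    apply find_eq x y k r _ 0 (by omega)
    · omega
    · exact (PySem.Int.mod_eq_zero_iff_dvd _ _).mpr hr
    · intro j hj1 hj2 hmod
      exact hrmin j (by omega) hj2 ((PySem.Int.mod_eq_zero_iff_dvd _ _).mp hmod)
  have hrhs : GetMinM_alt.jump D kk (D.toNat + 1) r = n := by
    have hi_le : i ≤ D.toNat + 1 := by
      rcases Nat.eq_zero_or_pos i with hi0 | hi1
      · omega
      · have := (hDbig hi1).1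
        omega
    rw [hndef]
    apply jump_eq D kk (D.toNat + 1) i r hi_le
    · exact hn
    · intro j hj
      exact himin j hj
  rw [hlhs, hfind, hrhs]

-- ===== VERDICT (by name: the statement is the Claim_ definition above) =====
theorem GetMinM_spec : Claim_equal_GetMinM := by
  intro trip D _ hpre
  obtain ⟨hlen, hk, hgx⟩ := hpre
  rcases trip with _ | ⟨a, _ | ⟨b, _ | ⟨c, rest⟩⟩⟩ <;> simp only [List.length] at hlen <;> try omega
  simp only [List.getD_cons_succ, List.getD_cons_zero] at hk hgx
  unfold Spec_GetMinM GetMinM GetMinM_alt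
  have h0 : PySem.List.pyGetD (a :: b :: c :: rest) 0 0 = a := by simp [pysem]
  have h1 : PySem.List.pyGetD (a :: b :: c :: rest) 1 0 = b := by simp [pysem]
  have h2 : PySem.List.pyGetD (a :: b :: c :: rest) 2 0 = c := by simp [pysem]
  rw [h0, h1, h2]
  exact core_eq a b c D hk hgx
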